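-- pv_equiv track=rewrite | github.com/CamiloJose/Intro.Progra | Semestre 2/RESPUESTAS ejerc-4b-ii2019.py | reste1_aux
-- ===== SOURCE A (Python) =====
-- def reste1_aux(num, exponente):
--     if num ==0:
--         return 0
--     else:
--         if num%10 ==0:
--             return (reste1_aux(num //10, exponente+1))
--         else:
--             return(num%10-1)*10**exponente+reste1_aux(num//10,exponente+1)
-- ===== SOURCE B (Python) =====
-- def reste1_aux(num, exponente):
--     result = 0
--     exp = exponente
--     while num != 0:
--         d = num % 10
--         if d != 0:
--             result += (d - 1) * 10 ** exp
--         num //= 10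
--         exp += 1
--     return result
-- ===== Notes on version B (the rewrite author's own statement) =====
-- stated objective: alternative
-- what changed: Replaced the recursive per-digit descent by an explicit iterative while-loop with a result accumulator and a running exponent.
-- outside the precondition, e.g. on reste1_aux(5, -1): A returns 0.4, B returns 0.4
import Mathlib
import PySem

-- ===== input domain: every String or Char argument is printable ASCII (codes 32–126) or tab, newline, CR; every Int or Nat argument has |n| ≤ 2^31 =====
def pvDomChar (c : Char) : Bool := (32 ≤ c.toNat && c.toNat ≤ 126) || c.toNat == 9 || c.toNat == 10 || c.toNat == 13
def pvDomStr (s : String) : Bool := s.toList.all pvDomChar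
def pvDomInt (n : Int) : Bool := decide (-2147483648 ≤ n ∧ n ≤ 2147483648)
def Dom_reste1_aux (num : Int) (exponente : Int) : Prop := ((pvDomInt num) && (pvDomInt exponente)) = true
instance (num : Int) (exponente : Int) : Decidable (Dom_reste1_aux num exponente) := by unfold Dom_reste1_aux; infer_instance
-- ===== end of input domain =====

-- B replaces A's recursive per-digit descent by an explicit iterative accumulator loop (alternative decomposition, same cost).


-- Termination measure for both ports: num // 10 strictly shrinks when 0 < num.
theorem pvFdiv10_lt (num : Int) (h : 0 < num) : (PySem.Int.floordiv num 10).toNat < num.toNat := by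
  have h1 : num.fdiv 10 = num / 10 := Int.fdiv_eq_ediv_of_nonneg num (by omega)
  simp only [PySem.Int.floordiv, h1]
  omega

-- ===== PORT A =====
-- Literal port of A's recursion. For num < 0 Python's recursion never terminates
-- (RecursionError, excluded by Pre_); the `num ≤ 0` guard merges that case with the
-- num = 0 base case only to make the Lean function total. `10 ** exponente` is ported
-- as 10 ^ exponente.toNat; for exponente < 0 Python produces a float (excluded by Pre_).
def reste1_aux (num : Int) (exponente : Int) : Int :=
  if h : num ≤ 0 then 0
  else
    if PySem.Int.mod num 10 = 0 then
      reste1_aux (PySem.Int.floordiv num 10) (exponente + 1)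
    else
      (PySem.Int.mod num 10 - 1) * 10 ^ exponente.toNat
        + reste1_aux (PySem.Int.floordiv num 10) (exponente + 1)
termination_by num.toNat
decreasing_by
  all_goals exact pvFdiv10_lt _ (by omega)

-- ===== PORT B =====
-- Iterative loop of Source B as tail recursion over the loop state (result, exp);
-- the `num ≤ 0` guard is the `while num != 0` test plus a totality guard for
-- num < 0 (where the Python loop never terminates; excluded by Pre_).
def reste1AuxLoop (num : Int) (exp : Int) (result : Int) : Int :=
  if h : num ≤ 0 then result
  else
    let d := PySem.Int.mod num 10
    reste1AuxLoop (PySem.Int.floordiv num 10) (exp + 1)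
      (if d ≠ 0 then result + (d - 1) * 10 ^ exp.toNat else result)
termination_by num.toNat
decreasing_by
  exact pvFdiv10_lt _ (by omega)

def reste1_aux_alt (num : Int) (exponente : Int) : Int :=
  reste1AuxLoop num exponente 0

-- ===== PRECONDITION & SPEC =====
-- Pre_ excludes num < 0 (A's recursion never reaches the base case: RecursionError)
-- and num > 0 with exponente < 0 (10 ** exponente is a float, so A does not return an int).
def Pre_reste1_aux (num : Int) (exponente : Int) : Prop :=
  0 ≤ num ∧ (num = 0 ∨ 0 ≤ exponente)
instance (num : Int) (exponente : Int) : Decidable (Pre_reste1_aux num exponente) := by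
  unfold Pre_reste1_aux; infer_instance

def pvWitness_reste1_aux : Int × Int := (100203, 0)

def Spec_reste1_aux (num : Int) (exponente : Int) (out : Int) : Prop := out = reste1_aux_alt num exponente
instance (num : Int) (exponente : Int) (out : Int) : Decidable (Spec_reste1_aux num exponente out) := by unfold Spec_reste1_aux; infer_instance

-- ===== CLAIM (what is proved, stated in full; the proofs are below) =====
def Claim_equal_reste1_aux : Prop := ∀ (num : Int) (exponente : Int), Dom_reste1_aux num exponente → Pre_reste1_aux num exponente → Spec_reste1_aux num exponente (reste1_aux num exponente)

-- ===== LEMMAS AND PROOFS =====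

-- Loop accumulator invariant: the loop computes acc + (A's recursive value).
theorem reste1AuxLoop_eq (num : Int) (exp acc : Int) :
    reste1AuxLoop num exp acc = acc + reste1_aux num exp := by
  rw [reste1AuxLoop, reste1_aux]
  split
  · simp
  · rename_i h
    have hrec := reste1AuxLoop_eq (PySem.Int.floordiv num 10) (exp + 1)
    by_cases hz : PySem.Int.mod num 10 = 0
    · simp only [hrec, hz, ne_eq, not_true_eq_false, if_false, if_pos]
    · simp only [hrec, hz, ne_eq, not_false_eq_true, if_true, ite_false]
      ring
termination_by num.toNat
decreasing_by
  all_goals exact pvFdiv10_lt _ (by omega)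

-- ===== VERDICT (by name: the statement is the Claim_ definition above) =====
theorem reste1_aux_spec : Claim_equal_reste1_aux := by
  intro num exponente _ _
  unfold Spec_reste1_aux reste1_aux_alt
  rw [reste1AuxLoop_eq]
  simp
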